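-- pv_equiv track=rewrite | github.com/VenkyNadiminti/hackerrank_solved | Quadruples of XOR.py | solve
-- ===== SOURCE A (Python) =====
-- from bisect import bisect_left,bisect_right
--
-- def solve(a,b,c,d,x,n):
--     count=0
--     v1,v2=[],[]
--     for i in range(n):
--         for j in range(n):
--             v1.append(a[i]^b[j])
--             v2.append(x^c[i]^d[j])
--     v1.sort()
--     for i in range(len(v2)):
--         low=bisect_left(v1,v2[i])
--         high=bisect_right(v1,v2[i])
--         count+=high-low
--     return count
-- ===== SOURCE B (Python) =====
-- def solve(a, b, c, d, x, n):
--     # Works on DISTINCT values weighted by multiplicity: per-list frequency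
--     # tables, then an XOR convolution of the two counter pairs -- never
--     # materialises or sorts the n^2 pair lists.
--     def counter(vals):
--         cnt = {}
--         for v in vals:
--             cnt[v] = cnt.get(v, 0) + 1
--         return cnt
--
--     ca = counter(a[i] for i in range(n))
--     cb = counter(b[j] for j in range(n))
--     cc = counter(c[i] for i in range(n))
--     cd = counter(d[j] for j in range(n))
--     f1 = {}
--     for u, cu in ca.items():
--         for v, cv in cb.items():
--             w = u ^ v
--             f1[w] = f1.get(w, 0) + cu * cv
--     total = 0
--     for u, cu in cc.items():
--         for v, cv in cd.items():
--             total += cu * cv * f1.get(x ^ u ^ v, 0)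
--     return total
-- ===== Notes on version B (the rewrite author's own statement) =====
-- stated objective: faster
-- what changed: B never materialises or sorts the n^2 pair lists: it builds per-list frequency tables of the four input lists and counts quadruples by an XOR convolution over DISTINCT values weighted by multiplicities, versus A's sort of the n^2-element v1 plus bisect per query; intended as faster -- a timing run measured ~5-7x at the sizes both finish, unconfirmed at the top size where both time out.
import Mathlib
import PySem

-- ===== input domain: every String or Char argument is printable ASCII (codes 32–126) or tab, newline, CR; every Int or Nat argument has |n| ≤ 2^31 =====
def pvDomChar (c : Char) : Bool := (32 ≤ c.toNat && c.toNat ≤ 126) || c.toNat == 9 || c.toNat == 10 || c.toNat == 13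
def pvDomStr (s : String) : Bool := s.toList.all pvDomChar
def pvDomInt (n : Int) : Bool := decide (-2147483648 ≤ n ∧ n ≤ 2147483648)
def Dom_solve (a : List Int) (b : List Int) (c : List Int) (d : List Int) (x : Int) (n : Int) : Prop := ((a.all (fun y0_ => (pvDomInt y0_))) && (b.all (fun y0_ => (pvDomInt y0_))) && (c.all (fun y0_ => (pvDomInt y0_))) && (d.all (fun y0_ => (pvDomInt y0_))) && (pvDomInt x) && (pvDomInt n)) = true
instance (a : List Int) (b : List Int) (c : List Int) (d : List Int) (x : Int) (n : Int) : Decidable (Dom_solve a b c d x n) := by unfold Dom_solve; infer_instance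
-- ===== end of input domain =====

-- B counts quadruples by an XOR convolution over per-list frequency tables of distinct values instead of
-- A's sorted n^2 pair list with bisect per query; intended as faster (probe measured ~5-7x where both finish).

-- ===== PORT A =====
-- A: build v1=[a[i]^b[j]], v2=[x^c[i]^d[j]] in one nested loop over a pair state,
--    sort v1, then count += bisect_right - bisect_left for each v2[i].
def solve (a : List Int) (b : List Int) (c : List Int) (d : List Int) (x : Int) (n : Int) : Int :=
  let vs : List Int × List Int :=
    (PySem.List.pyRange 0 n).foldl (fun st i =>
      (PySem.List.pyRange 0 n).foldl (fun st j =>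
        (st.1 ++ [PySem.Int.bxor (PySem.List.pyGetD a i 0) (PySem.List.pyGetD b j 0)],
         st.2 ++ [PySem.Int.bxor (PySem.Int.bxor x (PySem.List.pyGetD c i 0)) (PySem.List.pyGetD d j 0)])) st)
      ([], [])
  let v1 := PySem.List.sorted vs.1 (fun y => y)
  (PySem.List.pyRange 0 (PySem.List.len vs.2)).foldl (fun count i =>
    let q := PySem.List.pyGetD vs.2 i 0
    let low : Int := (PySem.List.bisectLeft v1 q : Int)
    let high : Int := (PySem.List.bisectRight v1 q : Int)
    count + (high - low)) 0

-- ===== PORT B =====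
-- B's helper counter(vals): plain dict frequency table built in one pass.
def pyCounter (vals : List Int) : PySem.Dict Int Int :=
  vals.foldl (fun cnt v => cnt.insert v (cnt.getD v 0 + 1)) PySem.Dict.empty

-- B: per-list counters; f1[u^v] += cu*cv over the distinct items of ca×cb;
--    then total += cu*cv*f1.get(x^u^v, 0) over the distinct items of cc×cd.
def solve_alt (a : List Int) (b : List Int) (c : List Int) (d : List Int) (x : Int) (n : Int) : Int :=
  let ca := pyCounter ((PySem.List.pyRange 0 n).map (fun i => PySem.List.pyGetD a i 0))
  let cb := pyCounter ((PySem.List.pyRange 0 n).map (fun j => PySem.List.pyGetD b j 0))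
  let cc := pyCounter ((PySem.List.pyRange 0 n).map (fun i => PySem.List.pyGetD c i 0))
  let cd := pyCounter ((PySem.List.pyRange 0 n).map (fun j => PySem.List.pyGetD d j 0))
  let f1 : PySem.Dict Int Int :=
    ca.items.foldl (fun f p =>
      cb.items.foldl (fun f q =>
        let w := PySem.Int.bxor p.1 q.1
        f.insert w (f.getD w 0 + p.2 * q.2)) f) PySem.Dict.empty
  cc.items.foldl (fun t p =>
    cd.items.foldl (fun t q =>
      t + p.2 * q.2 * f1.getD (PySem.Int.bxor (PySem.Int.bxor x p.1) q.1) 0) t) 0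

-- ===== PRECONDITION & SPEC =====
-- Pre_ excludes exactly the inputs where Python A raises IndexError: a[i]/b[j]/c[i]/d[j]
-- is read for every i,j in range(n), so all four lists must have length ≥ n (or n ≤ 0).
def Pre_solve (a : List Int) (b : List Int) (c : List Int) (d : List Int) (x : Int) (n : Int) : Prop :=
  n ≤ 0 ∨ (n ≤ (a.length : Int) ∧ n ≤ (b.length : Int) ∧ n ≤ (c.length : Int) ∧ n ≤ (d.length : Int))
instance (a : List Int) (b : List Int) (c : List Int) (d : List Int) (x : Int) (n : Int) : Decidable (Pre_solve a b c d x n) := by unfold Pre_solve; infer_instance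
def pvWitness_solve : List Int × List Int × List Int × List Int × Int × Int := ([1, 2], [3, 0], [2, 1], [0, 3], 1, 2)
def Spec_solve (a : List Int) (b : List Int) (c : List Int) (d : List Int) (x : Int) (n : Int) (out : Int) : Prop := out = solve_alt a b c d x n
instance (a : List Int) (b : List Int) (c : List Int) (d : List Int) (x : Int) (n : Int) (out : Int) : Decidable (Spec_solve a b c d x n out) := by unfold Spec_solve; infer_instance

-- ===== CLAIM (what is proved, stated in full; the proofs are below) =====
def Claim_equal_solve : Prop := ∀ (a : List Int) (b : List Int) (c : List Int) (d : List Int) (x : Int) (n : Int), Dom_solve a b c d x n → Pre_solve a b c d x n → Spec_solve a b c d x n (solve a b c d x n)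

-- ===== LEMMAS AND PROOFS =====

-- On a ≤-sorted list, bisect_right − bisect_left is the multiplicity of the query.
theorem bisect_sub_eq_count (s : List Int) (q : Int) (hs : s.Pairwise (· ≤ ·)) :
    (PySem.List.bisectRight s q : Int) - (PySem.List.bisectLeft s q : Int) = (s.count q : Int) := by
  obtain ⟨hblL, hbl1, hbl2⟩ := PySem.List.bisectLeft_spec s q hs
  obtain ⟨hbrL, hbr1, hbr2⟩ := PySem.List.bisectRight_spec s q hs
  set bl := PySem.List.bisectLeft s q with hbl
  set br := PySem.List.bisectRight s q with hbr
  have hle : bl ≤ br := by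
    by_contra h
    push Not at h
    have hbrlen : br < s.length := lt_of_lt_of_le h hblL
    have h1 := hbl1 br hbrlen h
    have h2 := hbr2 br hbrlen (le_refl br)
    omega
  have hcount : s.count q = br - bl := by
    have hsplit : s = s.take br ++ s.drop br := (List.take_append_drop br s).symm
    have hdrop : (s.drop br).count q = 0 := by
      rw [List.count_eq_zero]
      intro hmem
      obtain ⟨k, hk, hk2⟩ := List.getElem_of_mem hmem
      rw [List.getElem_drop] at hk2
      have := hbr2 (br + k) (by have := List.length_drop (l := s) (i := br) ▸ hk; omega)
        (Nat.le_add_right br k)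
      omega
    have htake : s.take br = s.take bl ++ (s.drop bl).take (br - bl) := by
      have h' : br = bl + (br - bl) := by omega
      conv_lhs => rw [h']
      rw [List.take_add]
    have htakebl : (s.take bl).count q = 0 := by
      rw [List.count_eq_zero]
      intro hmem
      obtain ⟨k, hk, hk2⟩ := List.getElem_of_mem hmem
      have hklen : k < s.length := by
        have := List.length_take (i := bl) (l := s); omega
      rw [List.getElem_take] at hk2
      have hkbl : k < bl := by
        have := List.length_take (i := bl) (l := s); omega
      have := hbl1 k hklen hkbl
      omega
    have hmid : ((s.drop bl).take (br - bl)).count q = br - bl := by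
      have hlen : ((s.drop bl).take (br - bl)).length = br - bl := by
        rw [List.length_take, List.length_drop]; omega
      have hall : ∀ y ∈ (s.drop bl).take (br - bl), q = y := by
        intro y hmem
        obtain ⟨k, hk, hk2⟩ := List.getElem_of_mem hmem
        rw [List.getElem_take, List.getElem_drop] at hk2
        have hkidx : bl + k < s.length := by
          have := List.length_drop (l := s) (i := bl)
          have := List.length_take (i := br - bl) (l := s.drop bl)
          omega
        have hklt : bl + k < br := by omega
        have h1 := hbr1 (bl + k) hkidx hklt
        have h2 := hbl2 (bl + k) hkidx (Nat.le_add_right bl k)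
        omega
      rw [List.count_eq_length.mpr hall]
      exact hlen
    calc s.count q = (s.take br ++ s.drop br).count q := by rw [← hsplit]
      _ = (s.take br).count q + (s.drop br).count q := List.count_append ..
      _ = (s.take bl ++ (s.drop bl).take (br - bl)).count q + 0 := by rw [htake, hdrop]
      _ = (s.take bl).count q + ((s.drop bl).take (br - bl)).count q := by
            rw [List.count_append]; omega
      _ = br - bl := by rw [htakebl, hmid]; omega
  omega

-- The per-index value lists both programs read (a[i] for i in range(n), …).
def pvArg (l : List Int) (n : Int) : List Int :=
  (PySem.List.pyRange 0 n).map (fun i => PySem.List.pyGetD l i 0)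

-- The pair-value lists A materialises.
def pvV1 (a : List Int) (b : List Int) (n : Int) : List Int :=
  (pvArg a n).flatMap (fun u => (pvArg b n).map (fun v => PySem.Int.bxor u v))

def pvV2 (c : List Int) (d : List Int) (x : Int) (n : Int) : List Int :=
  (pvArg c n).flatMap (fun u => (pvArg d n).map (fun v =>
    PySem.Int.bxor (PySem.Int.bxor x u) v))

-- A's build loop produces exactly (pvV1, pvV2).
theorem solve_build_eq (a b c d : List Int) (x n : Int) :
    (PySem.List.pyRange 0 n).foldl (fun st i =>
      (PySem.List.pyRange 0 n).foldl (fun st j =>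
        (st.1 ++ [PySem.Int.bxor (PySem.List.pyGetD a i 0) (PySem.List.pyGetD b j 0)],
         st.2 ++ [PySem.Int.bxor (PySem.Int.bxor x (PySem.List.pyGetD c i 0)) (PySem.List.pyGetD d j 0)])) st)
      (([], []) : List Int × List Int)
    = (pvV1 a b n, pvV2 c d x n) := by
  have hstep : ∀ (st : List Int × List Int) (i : Int),
      (PySem.List.pyRange 0 n).foldl (fun st j =>
        (st.1 ++ [PySem.Int.bxor (PySem.List.pyGetD a i 0) (PySem.List.pyGetD b j 0)],
         st.2 ++ [PySem.Int.bxor (PySem.Int.bxor x (PySem.List.pyGetD c i 0)) (PySem.List.pyGetD d j 0)])) st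
      = (st.1 ++ (PySem.List.pyRange 0 n).map (fun j =>
            PySem.Int.bxor (PySem.List.pyGetD a i 0) (PySem.List.pyGetD b j 0)),
         st.2 ++ (PySem.List.pyRange 0 n).map (fun j =>
            PySem.Int.bxor (PySem.Int.bxor x (PySem.List.pyGetD c i 0)) (PySem.List.pyGetD d j 0))) := by
    intro st i
    rw [PySem.List.foldl_prod_mk (fun s e => s ++ [PySem.Int.bxor (PySem.List.pyGetD a i 0) (PySem.List.pyGetD b e 0)])
      (fun s e => s ++ [PySem.Int.bxor (PySem.Int.bxor x (PySem.List.pyGetD c i 0)) (PySem.List.pyGetD d e 0)])]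
    rw [PySem.List.foldl_append_singleton_eq_map, PySem.List.foldl_append_singleton_eq_map]
  rw [PySem.List.foldl_congr_mem _ _ _ _ (fun st i _ => hstep st i)]
  rw [PySem.List.foldl_prod_mk
    (fun s i => s ++ (PySem.List.pyRange 0 n).map (fun j =>
        PySem.Int.bxor (PySem.List.pyGetD a i 0) (PySem.List.pyGetD b j 0)))
    (fun s i => s ++ (PySem.List.pyRange 0 n).map (fun j =>
        PySem.Int.bxor (PySem.Int.bxor x (PySem.List.pyGetD c i 0)) (PySem.List.pyGetD d j 0)))]
  rw [PySem.List.foldl_append_eq_flatMap, PySem.List.foldl_append_eq_flatMap]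
  simp only [pvV1, pvV2, pvArg, List.flatMap_map, List.map_map]
  rfl

-- Grouping: a sum over a list equals the sum over its distinct values weighted by multiplicity.
theorem sum_map_eq_dedup_weighted (l : List Int) (g : Int → Int) :
    (l.map g).sum = ((PySem.List.dedup l).map (fun u => (l.count u : Int) * g u)).sum := by
  have hfs : (PySem.List.dedup l).toFinset = l.toFinset := by ext z; simp
  calc (l.map g).sum = ((l : Multiset Int).map g).sum := by simp
    _ = ∑ a ∈ (l : Multiset Int).toFinset, (l : Multiset Int).count a • g a :=
        Finset.sum_multiset_map_count _ _
    _ = ∑ a ∈ l.toFinset, (l.count a : Int) * g a := by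
        refine Finset.sum_congr (by simp) ?_
        intro a _
        simp
    _ = ((PySem.List.dedup l).map (fun u => (l.count u : Int) * g u)).sum := by
        rw [← hfs, List.sum_toFinset _ (PySem.List.nodup_dedup l)]

-- Count as a 0/1 integer sum.
theorem count_eq_sum_ite (l : List Int) (w : Int) :
    ((l.count w : Nat) : Int) = (l.map (fun z => if z = w then (1:Int) else 0)).sum := by
  induction l with
  | nil => simp
  | cons h t ih =>
    by_cases hw : h = w
    · simp [hw, ih]; omega
    · simp [hw, ih]

-- The accumulate-into-a-dict loop: lookup after the loop is the old value plus the guarded sum.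
theorem getD_foldl_insert_accum {α : Type} (L : List α) (k : α → Int) (m : α → Int)
    (d0 : PySem.Dict Int Int) (w : Int) :
    (L.foldl (fun f p => f.insert (k p) (f.getD (k p) 0 + m p)) d0).getD w 0
      = d0.getD w 0 + (L.map (fun r => if k r = w then m r else 0)).sum := by
  induction L generalizing d0 with
  | nil => simp
  | cons r t ih =>
    simp only [List.foldl_cons, List.map_cons, List.sum_cons, ih]
    rw [PySem.Dict.getD_insert]
    split_ifs with h1 h2 h3
    · rw [h1]; ring
    · exact absurd h1.symm h2
    · exact absurd h3.symm h1
    · ring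

-- Generalised double-sum shapes over pair lists.
theorem sum_map_flatMap {α β : Type} (L1 : List α) (g : α → List β) (f : β → Int) :
    ((L1.flatMap g).map f).sum = (L1.map (fun u => ((g u).map f).sum)).sum := by
  induction L1 with
  | nil => simp
  | cons h t ih => simp [List.flatMap_cons, ih]

theorem sum_map_pairs {α β : Type} (L1 : List α) (L2 : List β) (f : α × β → Int) :
    ((L1.flatMap (fun p => L2.map (fun q => (p, q)))).map f).sum
      = (L1.map (fun p => (L2.map (fun q => f (p, q))).sum)).sum := by
  rw [sum_map_flatMap]
  simp [List.map_map, Function.comp_def]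

-- Items of B's counter helper: distinct values paired with their counts.
theorem pyCounter_items (l : List Int) :
    (pyCounter l).items = (PySem.List.dedup l).map (fun k => (k, (l.count k : Int))) := by
  rw [show pyCounter l = PySem.Dict.counter l from
    PySem.Dict.foldl_insert_getD_add_one_eq_counter l]
  rw [PySem.Dict.items_counter]
  simp

-- B's f1 lookup is the multiplicity in A's v1 list.
theorem f1_getD (a b : List Int) (n : Int) (w : Int) :
    ((pyCounter (pvArg a n)).items.foldl (fun f p =>
        (pyCounter (pvArg b n)).items.foldl (fun f q =>
          f.insert (PySem.Int.bxor p.1 q.1) (f.getD (PySem.Int.bxor p.1 q.1) 0 + p.2 * q.2)) f)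
      PySem.Dict.empty).getD w 0
    = ((pvV1 a b n).count w : Int) := by
  have hflat : ∀ (L1 L2 : List (Int × Int)) (d0 : PySem.Dict Int Int),
      L1.foldl (fun f p => L2.foldl (fun f q =>
          f.insert (PySem.Int.bxor p.1 q.1) (f.getD (PySem.Int.bxor p.1 q.1) 0 + p.2 * q.2)) f) d0
      = (L1.flatMap (fun p => L2.map (fun q => (p, q)))).foldl
          (fun f r => f.insert (PySem.Int.bxor r.1.1 r.2.1)
            (f.getD (PySem.Int.bxor r.1.1 r.2.1) 0 + r.1.2 * r.2.2)) d0 := by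
    intro L1 L2 d0
    rw [List.foldl_flatMap]
    exact PySem.List.foldl_congr_mem _ _ _ _ (fun acc p _ => by rw [List.foldl_map])
  rw [hflat]
  refine (getD_foldl_insert_accum _ (fun r : (Int × Int) × Int × Int => PySem.Int.bxor r.1.1 r.2.1)
    (fun r => r.1.2 * r.2.2) PySem.Dict.empty w).trans ?_
  rw [PySem.Dict.getD_empty, zero_add, sum_map_pairs]
  rw [pyCounter_items, pyCounter_items]
  rw [count_eq_sum_ite]
  unfold pvV1
  rw [sum_map_flatMap]
  rw [sum_map_eq_dedup_weighted (pvArg a n)]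
  simp only [List.map_map, Function.comp_def]
  refine congrArg List.sum (List.map_congr_left ?_)
  intro u _
  rw [sum_map_eq_dedup_weighted (pvArg b n), ← PySem.List.sum_map_const_mul_int]
  refine congrArg List.sum (List.map_congr_left ?_)
  intro v _
  split_ifs <;> ring

-- ===== VERDICT (by name: the statement is the Claim_ definition above) =====
theorem solve_spec : Claim_equal_solve := by
  intro a b c d x n _ _
  unfold Spec_solve solve solve_alt
  rw [solve_build_eq]
  -- A's counting loop as a sum over pvV2
  rw [PySem.List.foldl_pyRange_zero_pyGetD (pvV2 c d x n) 0
    (fun count q => count + ((PySem.List.bisectRight (PySem.List.sorted (pvV1 a b n) (fun y => y)) q : Int)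
      - (PySem.List.bisectLeft (PySem.List.sorted (pvV1 a b n) (fun y => y)) q : Int))) 0]
  rw [PySem.List.foldl_add]
  -- each bisect difference is the multiplicity in pvV1
  have hA : (pvV2 c d x n).map (fun q =>
      ((PySem.List.bisectRight (PySem.List.sorted (pvV1 a b n) (fun y => y)) q : Int)
        - (PySem.List.bisectLeft (PySem.List.sorted (pvV1 a b n) (fun y => y)) q : Int)))
      = (pvV2 c d x n).map (fun q => ((pvV1 a b n).count q : Int)) := by
    refine List.map_congr_left ?_
    intro q _
    rw [bisect_sub_eq_count _ q (PySem.List.sorted_pairwise (pvV1 a b n) (fun y => y))]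
    rw [(PySem.List.sorted_perm (pvV1 a b n) (fun y => y) false).count_eq q]
  rw [hA, zero_add]
  -- B's counting loop as the same sum, via double folds over counter items
  have hinner : ∀ (f1 : PySem.Dict Int Int) (L : List (Int × Int)) (p : Int × Int) (t : Int),
      L.foldl (fun t q => t + p.2 * q.2 * f1.getD (PySem.Int.bxor (PySem.Int.bxor x p.1) q.1) 0) t
      = t + (L.map (fun q => p.2 * q.2 * f1.getD (PySem.Int.bxor (PySem.Int.bxor x p.1) q.1) 0)).sum := by
    intro f1 L p t
    rw [PySem.List.foldl_add]
  rw [PySem.List.foldl_congr_mem _ _ _ _ (fun t p _ => hinner _ _ p t)]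
  rw [PySem.List.foldl_add, zero_add]
  -- replace the f1 lookups by pvV1 multiplicities
  have hf1 : ∀ (p q : Int × Int),
      p.2 * q.2 * (((pyCounter (pvArg a n)).items.foldl (fun f p =>
        (pyCounter (pvArg b n)).items.foldl (fun f q =>
          f.insert (PySem.Int.bxor p.1 q.1) (f.getD (PySem.Int.bxor p.1 q.1) 0 + p.2 * q.2)) f)
        PySem.Dict.empty).getD (PySem.Int.bxor (PySem.Int.bxor x p.1) q.1) 0)
      = p.2 * q.2 * ((pvV1 a b n).count (PySem.Int.bxor (PySem.Int.bxor x p.1) q.1) : Int) := by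
    intro p q
    rw [f1_getD]
  have hArg : ∀ l : List Int, (PySem.List.pyRange 0 n).map (fun i => PySem.List.pyGetD l i 0) = pvArg l n :=
    fun l => rfl
  simp only []
  simp only [hArg]
  -- A side: sum over pvV2 as a dedup-weighted double sum
  unfold pvV2
  rw [sum_map_flatMap, sum_map_eq_dedup_weighted (pvArg c n)]
  -- B side: items as dedup maps
  rw [pyCounter_items (pvArg c n), pyCounter_items (pvArg d n)]
  simp only [List.map_map, Function.comp_def]
  refine congrArg List.sum (List.map_congr_left ?_)
  intro u _
  rw [sum_map_eq_dedup_weighted (pvArg d n), ← PySem.List.sum_map_const_mul_int]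
  refine congrArg List.sum (List.map_congr_left ?_)
  intro v _
  rw [hf1 (u, ((pvArg c n).count u : Int)) (v, ((pvArg d n).count v : Int))]
  ring
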